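-- pv_equiv track=rewrite | github.com/pramirez2328/python_projects | week5/homework_week5/prlara_hw_5_4.py | list_to_twice_words
-- ===== SOURCE A (Python) =====
-- def list_to_twice_words(words_list):
--     '''Returns a list that contains only words
--     that occurred exactly TWICE in the file
--     '''
--     words_dict = {}
--     for word in words_list:
--         if word in words_dict:
--             words_dict[word] += 1
--         else:
--             words_dict[word] = 1
--     return [word for word in words_dict if words_dict[word] == 2]
-- ===== SOURCE B (Python) =====
-- def list_to_twice_words(words_list):
--     result = []
--     for word in words_list:
--         if words_list.count(word) == 2 and word not in result:
--             result.append(word)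
--     return result
-- ===== Notes on version B (the rewrite author's own statement) =====
-- stated objective: alternative
-- what changed: Replaces the counting dict plus key-comprehension with a single pass that appends a word when words_list.count(word) == 2 and it is not already in the result, preserving first-seen order.
import Mathlib
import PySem

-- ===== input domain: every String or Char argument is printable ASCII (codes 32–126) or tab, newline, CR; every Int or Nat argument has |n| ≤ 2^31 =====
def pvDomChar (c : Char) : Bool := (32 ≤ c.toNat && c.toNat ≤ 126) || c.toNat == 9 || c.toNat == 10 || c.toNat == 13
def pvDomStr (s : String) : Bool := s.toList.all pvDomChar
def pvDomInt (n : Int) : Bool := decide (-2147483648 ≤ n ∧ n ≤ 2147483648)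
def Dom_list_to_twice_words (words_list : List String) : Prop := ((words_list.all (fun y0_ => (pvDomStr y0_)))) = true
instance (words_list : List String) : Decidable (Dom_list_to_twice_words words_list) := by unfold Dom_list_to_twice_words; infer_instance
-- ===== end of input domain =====

-- B drops A's counting dict: one pass over words_list appending a word when its
-- full-list count is 2 and it is not yet in the result (alternative decomposition, not faster).


-- ===== PORT A =====
-- the counting loop: 'if word in words_dict: +=1 else: =1'; then the key comprehension
def list_to_twice_words (words_list : List String) : List String :=
  let words_dict : PySem.Dict String Int :=
    words_list.foldl
      (fun d word =>
        if d.contains word then d.insert word (d.getD word 0 + 1)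
        else d.insert word 1)
      PySem.Dict.empty
  words_dict.keys.filter (fun word => words_dict.getD word 0 == 2)

-- ===== PORT B =====
def list_to_twice_words_alt (words_list : List String) : List String :=
  words_list.foldl
    (fun result word =>
      if PySem.List.count words_list word == 2 && !(result.contains word) then
        result ++ [word]
      else result)
    []

-- ===== PRECONDITION & SPEC =====
def Spec_list_to_twice_words (words_list : List String) (out : List String) : Prop := out = list_to_twice_words_alt words_list
instance (words_list : List String) (out : List String) : Decidable (Spec_list_to_twice_words words_list out) := by unfold Spec_list_to_twice_words; infer_instance

-- ===== CLAIM (what is proved, stated in full; the proofs are below) =====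
def Claim_equal_list_to_twice_words : Prop := ∀ (words_list : List String), Dom_list_to_twice_words words_list → Spec_list_to_twice_words words_list (list_to_twice_words words_list)

-- ===== LEMMAS AND PROOFS =====

-- A's guarded counting step is the unguarded counter step (getD is 0 on a missing key).
theorem stepA_eq :
    (fun (d : PySem.Dict String Int) (word : String) =>
        if d.contains word then d.insert word (d.getD word 0 + 1)
        else d.insert word 1)
      = fun d word => d.insert word (d.getD word 0 + 1) := by
  funext d word
  by_cases h : d.contains word = true
  · simp [h]
  · have h0 : d.getD word 0 = 0 := by
      have : d.get? word = none := by
        rw [Bool.not_eq_true] at h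
        rw [PySem.Dict.contains_eq_isSome_get?] at h
        simpa using h
      simp [PySem.Dict.getD, this]
    simp [h, h0]

-- a word is in the filtered list iff it is in the list and passes the filter
theorem contains_filter (s : List String) (c : String → Bool) (w : String) :
    (s.filter c).contains w = (s.contains w && c w) := by
  rw [Bool.eq_iff_iff]
  simp [List.mem_filter]

-- B's loop with accumulator (ofList p).filter c extends to the whole list.
theorem foldB (c : String → Bool) :
    ∀ (l p : List String),
      l.foldl
        (fun result word =>
          if c word && !(result.contains word) then result ++ [word] else result)
        ((PySem.Set.ofList p).filter c)
      = (PySem.Set.ofList (p ++ l)).filter c := by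
  intro l
  induction l with
  | nil => intro p; simp
  | cons w rest ih =>
    intro p
    have hstep :
        (if c w && !(((PySem.Set.ofList p).filter c).contains w) then
            (PySem.Set.ofList p).filter c ++ [w]
          else (PySem.Set.ofList p).filter c)
          = (PySem.Set.ofList (p ++ [w])).filter c := by
      have hof : PySem.Set.ofList (p ++ [w]) = PySem.Set.add (PySem.Set.ofList p) w := by
        simp [PySem.Set.ofList_eq_foldl]
      rw [hof, contains_filter, PySem.Set.add]
      have hm' : (PySem.Set.ofList p).contains w = decide (w ∈ p) := by
        rw [Bool.eq_iff_iff]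
        simp [PySem.Set.mem_ofList]
      rw [hm']
      by_cases hp : w ∈ p <;> cases hc : c w <;>
        simp [hp, hc, List.filter_append]
    simp only [List.foldl_cons]
    rw [hstep]
    have := ih (p ++ [w])
    simpa using this

theorem A_closed (ws : List String) :
    list_to_twice_words ws
      = (PySem.Set.ofList ws).filter (fun w => ((ws.count w : Int)) == 2) := by
  unfold list_to_twice_words
  rw [stepA_eq, PySem.Dict.foldl_insert_getD_add_one_eq_counter]
  simp only [PySem.Dict.keys_counter, PySem.Dict.getD_counter]

theorem B_closed (ws : List String) :
    list_to_twice_words_alt ws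
      = (PySem.Set.ofList ws).filter (fun w => ws.count w == 2) := by
  unfold list_to_twice_words_alt
  have := foldB (fun w => ws.count w == 2) ws []
  simpa [PySem.List.count_eq] using this

-- ===== VERDICT (by name: the statement is the Claim_ definition above) =====
theorem list_to_twice_words_spec : Claim_equal_list_to_twice_words := by
  intro ws _
  unfold Spec_list_to_twice_words
  rw [A_closed, B_closed]
  apply List.filter_congr
  intro w _
  rw [Bool.eq_iff_iff]
  simp
  omega
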